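-- pv_equiv track=rewrite | github.com/mendelabramzon/defiscan | crypto_tools.py | pools_making_paths
-- ===== SOURCE A (Python) =====
-- def pools_making_paths(pools):
--     coins = [pool[0] for pool in pools] + [pool[1] for pool in pools]
--     n = 1
--     while n > 0:
--         n = 0
--         m = 0
--         while m < len(pools):
--             pool = pools[m]
--             if coins.count(pool[0]) < 2 or coins.count(pool[1]) < 2:
--                 pools.pop(m)
--                 coins.remove(pool[0])
--                 coins.remove(pool[1])
--                 n = 1
--             else:
--                 m += 1
--     return pools
-- ===== SOURCE B (Python) =====
-- def pools_making_paths(pools):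
--     # Rounds of bulk filtering with a coin counter built once per round,
--     # instead of A's in-place pop/remove scan with O(P) count() calls per pool.
--     kept = pools
--     while True:
--         coins = [a for a, _ in kept] + [b for _, b in kept]
--         cnt = {}
--         for c in coins:
--             cnt[c] = cnt.get(c, 0) + 1
--         new = [p for p in kept if cnt[p[0]] >= 2 and cnt[p[1]] >= 2]
--         if len(new) == len(kept):
--             return new
--         kept = new
-- ===== Notes on version B (the rewrite author's own statement) =====
-- stated objective: faster
-- what changed: Replaces A's in-place pop/remove scan (which recounts coins with list.count for every pool and restarts) by rounds of one bulk filter over a coin-count dictionary built once per round; the surviving set is the unique greatest subset in which every coin appears twice, so the results coincide.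
import Mathlib
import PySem

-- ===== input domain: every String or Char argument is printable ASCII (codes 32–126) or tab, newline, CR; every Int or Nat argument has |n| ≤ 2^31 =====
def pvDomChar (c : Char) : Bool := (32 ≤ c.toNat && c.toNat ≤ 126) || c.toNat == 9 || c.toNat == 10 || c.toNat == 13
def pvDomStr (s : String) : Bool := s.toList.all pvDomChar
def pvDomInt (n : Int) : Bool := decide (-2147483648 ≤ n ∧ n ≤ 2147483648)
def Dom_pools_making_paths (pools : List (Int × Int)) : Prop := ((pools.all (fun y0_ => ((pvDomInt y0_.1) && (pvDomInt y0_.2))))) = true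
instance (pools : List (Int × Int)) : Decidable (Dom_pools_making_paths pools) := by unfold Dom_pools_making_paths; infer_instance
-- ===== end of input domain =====

-- B replaces A's in-place pop/remove scan by rounds of one bulk filter over a coin
-- counter built once per round (faster); A mutates its argument in place, B does not —
-- the equivalence proved here is about the RETURN value only.

-- ===== PORT A =====
-- inner while loop: m, n are the Python locals; pools.pop(m) = eraseIdx, coins.remove(x) =
-- List.erase (exact here: coins is always the multiset of all pool coordinates, so the
-- removed values are present and Python's ValueError is unreachable)
def innerA (pools : List (Int × Int)) (coins : List Int) (m : Nat) (n : Nat) :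
    List (Int × Int) × List Int × Nat :=
  if h : m < pools.length then
    let pool := pools[m]
    if coins.count pool.1 < 2 || coins.count pool.2 < 2 then
      innerA (pools.eraseIdx m) ((coins.erase pool.1).erase pool.2) m 1
    else
      innerA pools coins (m + 1) n
  else
    (pools, coins, n)
termination_by pools.length - m
decreasing_by
  · have := List.length_eraseIdx_of_lt (l := pools) (i := m) h; omega
  · omega

-- outer while loop; the fuel argument is only a totality guard: one pass that pops
-- nothing ends the loop, and every other pass shrinks pools, so pools.length + 1
-- passes always suffice (proved in outerA_main below)
def outerA : Nat → List (Int × Int) → List Int → List (Int × Int)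
  | 0, pools, _ => pools
  | (fuel + 1), pools, coins =>
    let r := innerA pools coins 0 0
    if 0 < r.2.2 then outerA fuel r.1 r.2.1 else r.1

def pools_making_paths (pools : List (Int × Int)) : List (Int × Int) :=
  outerA (pools.length + 1) pools (pools.map Prod.fst ++ pools.map Prod.snd)

-- ===== PORT B =====
-- cnt = {}; for c in coins: cnt[c] = cnt.get(c, 0) + 1
def cntB (coins : List Int) : PySem.Dict Int Int :=
  coins.foldl (fun d c => d.insert c (d.getD c 0 + 1)) PySem.Dict.empty

-- one round: build the counter once, then bulk-filter
def stepB (kept : List (Int × Int)) : List (Int × Int) :=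
  let coins := kept.map Prod.fst ++ kept.map Prod.snd
  let cnt := cntB coins
  -- cnt[p[0]] / cnt[p[1]]: the keys are always present (p is in kept), so getD is exact here
  kept.filter (fun p => 2 ≤ cnt.getD p.1 0 && 2 ≤ cnt.getD p.2 0)

theorem stepB_len_le (kept : List (Int × Int)) : (stepB kept).length ≤ kept.length :=
  List.length_filter_le _ _

def loopB (kept : List (Int × Int)) : List (Int × Int) :=
  let neu := stepB kept
  if h : neu.length = kept.length then neu else loopB neu
termination_by kept.length
decreasing_by
  exact Nat.lt_of_le_of_ne (stepB_len_le kept) h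

def pools_making_paths_alt (pools : List (Int × Int)) : List (Int × Int) :=
  loopB pools

-- ===== PRECONDITION & SPEC =====
def Spec_pools_making_paths (pools : List (Int × Int)) (out : List (Int × Int)) : Prop := out = pools_making_paths_alt pools
instance (pools : List (Int × Int)) (out : List (Int × Int)) : Decidable (Spec_pools_making_paths pools out) := by unfold Spec_pools_making_paths; infer_instance

-- ===== CLAIM (what is proved, stated in full; the proofs are below) =====
def Claim_equal_pools_making_paths : Prop := ∀ (pools : List (Int × Int)), Dom_pools_making_paths pools → Spec_pools_making_paths pools (pools_making_paths pools)

-- ===== LEMMAS AND PROOFS =====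

-- number of occurrences of coin c among the coordinates of a multiset of pools
def cntM (c : Int) (s : Multiset (Int × Int)) : Nat :=
  (s.map Prod.fst).count c + (s.map Prod.snd).count c

-- every coin of every pool appears at least twice
def goodM (s : Multiset (Int × Int)) : Prop :=
  ∀ p ∈ s, 2 ≤ cntM p.1 s ∧ 2 ≤ cntM p.2 s

theorem cntM_coe (c : Int) (l : List (Int × Int)) :
    cntM c ↑l = (l.map Prod.fst ++ l.map Prod.snd).count c := by
  simp [cntM]

theorem cntM_mono {s t : Multiset (Int × Int)} (h : s ≤ t) (c : Int) : cntM c s ≤ cntM c t :=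
  Nat.add_le_add (Multiset.count_le_of_le c (Multiset.map_le_map h))
    (Multiset.count_le_of_le c (Multiset.map_le_map h))

theorem cntM_cons (c : Int) (p : Int × Int) (s : Multiset (Int × Int)) :
    cntM c (p ::ₘ s) = ((if p.1 = c then 1 else 0) + (if p.2 = c then 1 else 0)) + cntM c s := by
  simp only [cntM, Multiset.map_cons, Multiset.count_cons]
  split_ifs <;> omega

theorem coe_eraseIdx (l : List (Int × Int)) (m : Nat) (h : m < l.length) :
    (↑l : Multiset (Int × Int)) = l[m] ::ₘ ↑(l.eraseIdx m) := by
  have hdecomp : l.take m ++ l[m] :: l.drop (m + 1) = l := by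
    rw [List.getElem_cons_drop h, List.take_append_drop]
  have hp : l.Perm (l[m] :: l.eraseIdx m) := by
    rw [List.eraseIdx_eq_take_drop_succ]
    conv_lhs => rw [← hdecomp]
    exact List.perm_middle
  rw [Multiset.cons_coe]
  exact Multiset.coe_eq_coe.mpr hp

theorem filter_eraseIdx (l : List (Int × Int)) (m : Nat) (h : m < l.length)
    (q : Int × Int → Bool) (hq : q l[m] = false) :
    l.filter q = (l.eraseIdx m).filter q := by
  have hdecomp : l.take m ++ l[m] :: l.drop (m + 1) = l := by
    rw [List.getElem_cons_drop h, List.take_append_drop]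
  conv_lhs => rw [← hdecomp]
  rw [List.eraseIdx_eq_take_drop_succ, List.filter_append, List.filter_append,
    List.filter_cons]
  simp only [hq, Bool.false_eq_true, if_false]

theorem filter_sub {α : Type} (l : List α) (q pr : α → Bool)
    (h : ∀ x ∈ l, q x = true → pr x = true) :
    l.filter q = (l.filter pr).filter q := by
  induction l with
  | nil => rfl
  | cons x xs ih =>
    have ih' := ih (fun y hy hq => h y (List.mem_cons_of_mem x hy) hq)
    by_cases hq : q x = true
    · have hp := h x List.mem_cons_self hq
      simp [hq, hp, ih']
    · simp only [Bool.not_eq_true] at hq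
      by_cases hp : pr x = true
      · simp [hq, hp, ih']
      · simp only [Bool.not_eq_true] at hp
        simp [hq, hp, ih']

theorem not_mem_of_bad {g s : Multiset (Int × Int)} {p : Int × Int}
    (hg : goodM g) (hle : g ≤ s) (hbad : cntM p.1 s < 2 ∨ cntM p.2 s < 2) : p ∉ g := by
  intro hp
  rcases hg p hp with ⟨h1, h2⟩
  have m1 := cntM_mono hle p.1
  have m2 := cntM_mono hle p.2
  omega

theorem le_cons_of_not_mem {g t : Multiset (Int × Int)} {p : Int × Int}
    (hp : p ∉ g) (h : g ≤ p ::ₘ t) : g ≤ t := by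
  rw [Multiset.le_iff_count] at h ⊢
  intro a
  have ha := h a
  rw [Multiset.count_cons] at ha
  by_cases hap : a = p
  · subst hap; simp [Multiset.count_eq_zero.mpr hp]
  · simpa [hap] using ha

theorem count_erase_pair (coins : List Int) (p : Int × Int) (e : Multiset (Int × Int))
    (HC : ∀ c, coins.count c = cntM c (p ::ₘ e)) (c : Int) :
    ((coins.erase p.1).erase p.2).count c = cntM c e := by
  have h1 : (coins.erase p.1).count c = coins.count c - if p.1 == c then 1 else 0 :=
    List.count_erase
  have h2 : ((coins.erase p.1).erase p.2).count c
      = (coins.erase p.1).count c - if p.2 == c then 1 else 0 := List.count_erase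
  have h3 := HC c
  rw [cntM_cons] at h3
  rw [h2, h1, h3]
  simp only [beq_iff_eq]
  split_ifs <;> omega

-- length facts about the inner loop
theorem innerA_len_le (pools : List (Int × Int)) (coins : List Int) (m n : Nat) :
    (innerA pools coins m n).1.length ≤ pools.length := by
  fun_induction innerA pools coins m n with
  | case1 pools coins m n hm pool hc ih =>
    have := List.length_eraseIdx_of_lt (l := pools) (i := m) hm
    omega
  | case2 pools coins m n hm pool hc ih => exact ih
  | case3 pools coins m n hm => simp

-- if the inner loop returned an n different from the one passed in, it popped at least once
theorem innerA_lt (pools : List (Int × Int)) (coins : List Int) (m n : Nat)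
    (h : (innerA pools coins m n).2.2 ≠ n) :
    (innerA pools coins m n).1.length < pools.length := by
  fun_induction innerA pools coins m n with
  | case1 pools coins m n hm pool hc ih =>
    have h1 := innerA_len_le (pools.eraseIdx m) ((coins.erase pool.1).erase pool.2) m 1
    have := List.length_eraseIdx_of_lt (l := pools) (i := m) hm
    omega
  | case2 pools coins m n hm pool hc ih => exact ih h
  | case3 pools coins m n hm => simp at h

-- the inner loop: preserves the coins/pools synchronisation, only shrinks pools,
-- keeps every good sub-multiset, and only removes pools whose value cannot lie in
-- any good sub-multiset of the result
theorem innerA_main (pools : List (Int × Int)) (coins : List Int) (m n : Nat)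
    (HC : ∀ c, coins.count c = cntM c ↑pools) :
    (innerA pools coins m n).1.Sublist pools ∧
    (∀ c, (innerA pools coins m n).2.1.count c = cntM c ↑(innerA pools coins m n).1) ∧
    (∀ g : Multiset (Int × Int), goodM g → g ≤ ↑pools → g ≤ ↑(innerA pools coins m n).1) ∧
    (∀ R : Multiset (Int × Int), goodM R → R ≤ ↑(innerA pools coins m n).1 →
      pools.filter (fun x => decide (x ∈ R))
        = (innerA pools coins m n).1.filter (fun x => decide (x ∈ R))) := by
  fun_induction innerA pools coins m n with
  | case1 pools coins m n hm pool hc ih =>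
    have hco : (↑pools : Multiset (Int × Int)) = pool ::ₘ ↑(pools.eraseIdx m) :=
      coe_eraseIdx pools m hm
    have HC' : ∀ c, ((coins.erase pool.1).erase pool.2).count c = cntM c ↑(pools.eraseIdx m) :=
      count_erase_pair coins pool _ (fun c => by rw [HC c, hco])
    obtain ⟨ihS, ihC, ihG, ihF⟩ := ih HC'
    have hbad : cntM pool.1 ↑pools < 2 ∨ cntM pool.2 ↑pools < 2 := by
      simp only [Bool.or_eq_true, decide_eq_true_eq] at hc
      rcases hc with hc | hc
      · left; rw [← HC]; exact hc
      · right; rw [← HC]; exact hc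
    refine ⟨ihS.trans (List.eraseIdx_sublist ..), ihC, ?_, ?_⟩
    · intro g hg hle
      have hnot := not_mem_of_bad hg hle hbad
      refine ihG g hg ?_
      rw [hco] at hle
      exact le_cons_of_not_mem hnot hle
    · intro R hR hle
      have hsub : (↑(innerA (pools.eraseIdx m) ((coins.erase pool.1).erase pool.2) m 1).1
          : Multiset (Int × Int)) ≤ ↑(pools.eraseIdx m) := Multiset.coe_le.mpr ihS.subperm
      have hRe : R ≤ ↑pools := by
        rw [hco]
        exact le_trans (le_trans hle hsub) (Multiset.le_cons_self _ _)
      have hnot : pool ∉ R := not_mem_of_bad hR hRe hbad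
      rw [filter_eraseIdx pools m hm _ (by simpa using hnot)]
      exact ihF R hR hle
  | case2 pools coins m n hm pool hc ih =>
    exact ih HC
  | case3 pools coins m n hm =>
    exact ⟨List.Sublist.refl _, HC, fun g _ h => h, fun R _ _ => rfl⟩

-- if the inner loop returned n unchanged from 0, it removed nothing and every pool is good
theorem innerA_done (pools : List (Int × Int)) (coins : List Int) (m n : Nat)
    (HC : ∀ c, coins.count c = cntM c ↑pools)
    (h : (innerA pools coins m n).2.2 = 0) :
    n = 0 ∧ (innerA pools coins m n).1 = pools ∧
      ∀ p ∈ pools.drop m, 2 ≤ cntM p.1 ↑pools ∧ 2 ≤ cntM p.2 ↑pools := by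
  fun_induction innerA pools coins m n with
  | case1 pools coins m n hm pool hc ih =>
    have hco : (↑pools : Multiset (Int × Int)) = pool ::ₘ ↑(pools.eraseIdx m) :=
      coe_eraseIdx pools m hm
    have HC' : ∀ c, ((coins.erase pool.1).erase pool.2).count c = cntM c ↑(pools.eraseIdx m) :=
      count_erase_pair coins pool _ (fun c => by rw [HC c, hco])
    obtain ⟨h10, -, -⟩ := ih HC' h
    exact absurd h10 one_ne_zero
  | case2 pools coins m n hm pool hc ih =>
    obtain ⟨hn, hres, hdrop⟩ := ih HC h
    refine ⟨hn, hres, ?_⟩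
    intro p hp
    rw [← List.getElem_cons_drop hm, List.mem_cons] at hp
    rcases hp with hp | hp
    · simp only [Bool.or_eq_true, decide_eq_true_eq, not_or] at hc
      have c1 := HC pools[m].1
      have c2 := HC pools[m].2
      rw [show pool = pools[m] from rfl] at hc
      subst hp
      omega
    · exact hdrop p hp
  | case3 pools coins m n hm =>
    simp only at h
    refine ⟨h, rfl, ?_⟩
    intro p hp
    rw [List.drop_eq_nil_of_le (by omega)] at hp
    cases hp

-- the outer loop: with sufficient fuel its result is a good sublist of pools,
-- contains every good sub-multiset, and equals pools filtered by membership in the result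
theorem outerA_main (fuel : Nat) : ∀ (pools : List (Int × Int)) (coins : List Int),
    pools.length < fuel → (∀ c, coins.count c = cntM c ↑pools) →
    (outerA fuel pools coins).Sublist pools ∧ goodM ↑(outerA fuel pools coins) ∧
    (∀ g : Multiset (Int × Int), goodM g → g ≤ ↑pools → g ≤ ↑(outerA fuel pools coins)) ∧
    pools.filter (fun x => decide (x ∈ (↑(outerA fuel pools coins) : Multiset (Int × Int))))
      = outerA fuel pools coins := by
  induction fuel with
  | zero => exact fun pools coins hf _ => absurd hf (Nat.not_lt_zero _)
  | succ fuel ihf =>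
    intro pools coins hf HC
    by_cases hg : 0 < (innerA pools coins 0 0).2.2
    · have hout : outerA (fuel + 1) pools coins
          = outerA fuel (innerA pools coins 0 0).1 (innerA pools coins 0 0).2.1 := by
        simp only [outerA, if_pos hg]
      obtain ⟨iS, iC, iG, iF⟩ := innerA_main pools coins 0 0 HC
      have hlt := innerA_lt pools coins 0 0 (by omega)
      obtain ⟨oS, oG, oM, oF⟩ := ihf (innerA pools coins 0 0).1 (innerA pools coins 0 0).2.1
        (by omega) iC
      rw [hout]
      refine ⟨oS.trans iS, oG, ?_, ?_⟩
      · intro g hg' hle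
        exact oM g hg' (iG g hg' hle)
      · have hRle : (↑(outerA fuel (innerA pools coins 0 0).1 (innerA pools coins 0 0).2.1)
            : Multiset (Int × Int)) ≤ ↑(innerA pools coins 0 0).1 :=
          Multiset.coe_le.mpr oS.subperm
        rw [iF _ oG hRle]
        exact oF
    · have hout : outerA (fuel + 1) pools coins = (innerA pools coins 0 0).1 := by
        simp only [outerA, if_neg hg]
      obtain ⟨-, hres, hgood⟩ := innerA_done pools coins 0 0 HC (Nat.eq_zero_of_not_pos hg)
      rw [hout, hres]
      refine ⟨List.Sublist.refl _, ?_, fun g _ hle => hle, ?_⟩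
      · intro p hp
        exact hgood p (by simpa using Multiset.mem_coe.mp hp)
      · exact List.filter_eq_self.mpr (fun x hx => by simp [hx])

theorem cntB_getD (coins : List Int) (c : Int) :
    (cntB coins).getD c 0 = (coins.count c : Int) := by
  rw [cntB, PySem.Dict.foldl_insert_getD_add_one_eq_counter, PySem.Dict.getD_counter]

theorem stepB_eq_filter (kept : List (Int × Int)) :
    stepB kept = kept.filter
      (fun p => decide (2 ≤ cntM p.1 ↑kept) && decide (2 ≤ cntM p.2 ↑kept)) := by
  unfold stepB
  refine List.filter_congr (fun p _ => ?_)
  simp only [cntB_getD, ← cntM_coe]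
  congr 1 <;> rw [decide_eq_decide] <;> omega

theorem stepB_sublist (kept : List (Int × Int)) : (stepB kept).Sublist kept := by
  rw [stepB_eq_filter]; exact List.filter_sublist

-- B's loop: same three structural facts plus the filter characterisation
theorem loopB_main (kept : List (Int × Int)) :
    goodM ↑(loopB kept) ∧
    (∀ g : Multiset (Int × Int), goodM g → g ≤ ↑kept → g ≤ ↑(loopB kept)) ∧
    (loopB kept).Sublist kept ∧
    kept.filter (fun x => decide (x ∈ (↑(loopB kept) : Multiset (Int × Int)))) = loopB kept := by
  fun_induction loopB kept with
  | case1 kept neu h =>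
    have hk : stepB kept = kept := (stepB_sublist kept).eq_of_length h
    have hneu : neu = kept := hk
    rw [hneu]
    have hgood : goodM (↑kept : Multiset (Int × Int)) := by
      intro p hp
      have hp' : p ∈ kept.filter
          (fun p => decide (2 ≤ cntM p.1 ↑kept) && decide (2 ≤ cntM p.2 ↑kept)) := by
        rw [← stepB_eq_filter, hk]
        exact Multiset.mem_coe.mp hp
      have := (List.mem_filter.mp hp').2
      simp only [Bool.and_eq_true, decide_eq_true_eq] at this
      exact this
    refine ⟨hgood, fun g _ hle => hle, List.Sublist.refl _, ?_⟩
    exact List.filter_eq_self.mpr (fun x hx => by simp [hx])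
  | case2 kept neu h ih =>
    rw [show neu = stepB kept from rfl] at ih ⊢
    obtain ⟨iG, iM, iS, iF⟩ := ih
    refine ⟨iG, ?_, iS.trans (stepB_sublist kept), ?_⟩
    · intro g hg hle
      refine iM g hg ?_
      rw [stepB_eq_filter, Multiset.le_iff_count]
      intro x
      by_cases hxg : x ∈ g
      · have hx1 : 2 ≤ cntM x.1 ↑kept := le_trans (hg x hxg).1 (cntM_mono hle x.1)
        have hx2 : 2 ≤ cntM x.2 ↑kept := le_trans (hg x hxg).2 (cntM_mono hle x.2)
        have hq : (fun p => decide (2 ≤ cntM p.1 ↑kept) && decide (2 ≤ cntM p.2 ↑kept)) x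
            = true := by simp [hx1, hx2]
        have hco : (↑(kept.filter
            (fun p => decide (2 ≤ cntM p.1 ↑kept) && decide (2 ≤ cntM p.2 ↑kept)))
              : Multiset (Int × Int))
            = Multiset.filter (fun p =>
                ((decide (2 ≤ cntM p.1 ↑kept) && decide (2 ≤ cntM p.2 ↑kept)) = true)) ↑kept := by
          simp [Multiset.filter_coe]
        rw [hco, Multiset.count_filter, if_pos hq]
        exact Multiset.count_le_of_le x hle
      · simp [Multiset.count_eq_zero.mpr hxg]
    · have himp : ∀ x ∈ kept,
          (fun x => decide (x ∈ (↑(loopB (stepB kept)) : Multiset (Int × Int)))) x = true →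
          (fun p => decide (2 ≤ cntM p.1 ↑kept) && decide (2 ≤ cntM p.2 ↑kept)) x = true := by
        intro x _ hmem
        simp only [decide_eq_true_eq] at hmem
        have hle2 : (↑(loopB (stepB kept)) : Multiset (Int × Int)) ≤ ↑kept :=
          Multiset.coe_le.mpr (iS.trans (stepB_sublist kept)).subperm
        have hx1 := le_trans (iG x hmem).1 (cntM_mono hle2 x.1)
        have hx2 := le_trans (iG x hmem).2 (cntM_mono hle2 x.2)
        simp [hx1, hx2]
      rw [filter_sub kept _ _ himp, ← stepB_eq_filter]
      exact iF

theorem A_eq_B (pools : List (Int × Int)) :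
    pools_making_paths pools = pools_making_paths_alt pools := by
  have HC0 : ∀ c, (pools.map Prod.fst ++ pools.map Prod.snd).count c = cntM c ↑pools :=
    fun c => (cntM_coe c pools).symm
  obtain ⟨aS, aG, aM, aF⟩ := outerA_main (pools.length + 1) pools
    (pools.map Prod.fst ++ pools.map Prod.snd) (Nat.lt_succ_self _) HC0
  obtain ⟨bG, bM, bS, bF⟩ := loopB_main pools
  have hAB : (↑(outerA (pools.length + 1) pools (pools.map Prod.fst ++ pools.map Prod.snd))
      : Multiset (Int × Int)) = ↑(loopB pools) := by
    apply le_antisymm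
    · exact bM _ aG (Multiset.coe_le.mpr aS.subperm)
    · exact aM _ bG (Multiset.coe_le.mpr bS.subperm)
  show outerA (pools.length + 1) pools (pools.map Prod.fst ++ pools.map Prod.snd) = loopB pools
  rw [← aF, hAB, bF]

-- ===== VERDICT (by name: the statement is the Claim_ definition above) =====
theorem pools_making_paths_spec : Claim_equal_pools_making_paths := by
  intro pools _
  unfold Spec_pools_making_paths
  exact A_eq_B pools
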